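-- pv_equiv track=rewrite | github.com/H4R335HR/paatshala | streamlit_modules/pages/tryhackme.py | find_thm_feedback
-- ===== SOURCE A (Python) =====
-- def find_thm_feedback(feedbacks):
--     """
--     Find a feedback form that likely contains TryHackMe usernames.
--
--     Searches for (in priority order):
--     1. 'account' + 'creation' or 'feedback' in name
--     2. 'tryhackme' in name
--     3. 'task' in name (e.g., TasksFeedback)
--
--     Returns: (feedback_name, module_id) or (None, None)
--     """
--     if not feedbacks:
--         return None, None
--
--     # Priority 1: Account Creation Feedback
--     for f in feedbacks:
--         name = f[0].lower()
--         if 'account' in name and ('creation' in name or 'feedback' in name):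
--             return f[0], f[1]
--
--     # Priority 2: TryHackMe in name
--     for f in feedbacks:
--         if 'tryhackme' in f[0].lower():
--             return f[0], f[1]
--
--     # Priority 3: Task in name (covers TasksFeedback, Task 2, etc.)
--     for f in feedbacks:
--         if 'task' in f[0].lower():
--             return f[0], f[1]
--
--     return None, None
-- ===== SOURCE B (Python) =====
-- def find_thm_feedback(feedbacks):
--     """Single pass: return immediately on a priority-1 match; remember the first
--     priority-2 and priority-3 candidates in slots and pick the best at the end."""
--     p2 = p3 = None
--     for f in feedbacks:
--         name = f[0].lower()
--         if 'account' in name and ('creation' in name or 'feedback' in name):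
--             return f[0], f[1]
--         elif p2 is None and 'tryhackme' in name:
--             p2 = (f[0], f[1])
--         elif p3 is None and 'task' in name:
--             p3 = (f[0], f[1])
--     if p2 is not None:
--         return p2
--     if p3 is not None:
--         return p3
--     return None, None
-- ===== Notes on version B (the rewrite author's own statement) =====
-- stated objective: faster
-- what changed: Replaces A's three sequential scans (one per priority level) with a single pass that early-returns on a priority-1 match and keeps first-match slots for priorities 2 and 3.
import Mathlib
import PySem

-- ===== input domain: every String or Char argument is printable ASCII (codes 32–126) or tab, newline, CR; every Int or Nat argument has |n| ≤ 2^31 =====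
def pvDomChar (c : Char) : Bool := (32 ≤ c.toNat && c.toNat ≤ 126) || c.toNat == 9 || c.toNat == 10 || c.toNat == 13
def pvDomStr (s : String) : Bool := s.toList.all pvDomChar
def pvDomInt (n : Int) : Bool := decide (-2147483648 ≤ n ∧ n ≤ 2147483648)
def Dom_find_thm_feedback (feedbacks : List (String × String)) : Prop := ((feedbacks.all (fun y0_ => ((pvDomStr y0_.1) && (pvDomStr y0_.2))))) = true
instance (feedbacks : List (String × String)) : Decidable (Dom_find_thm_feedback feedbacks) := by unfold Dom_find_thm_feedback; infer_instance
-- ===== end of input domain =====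

-- B replaces A's three sequential priority scans by a single pass with result slots (objective: faster, constant-factor — one scan instead of up to three).

-- ===== PORT A =====
-- the priority-1 condition, as both Pythons spell it
def pvCond1 (f : String × String) : Bool :=
  let name := PySem.Str.lower f.1
  PySem.Str.isIn "account" name && (PySem.Str.isIn "creation" name || PySem.Str.isIn "feedback" name)

-- A's first 'for' loop: first f with the priority-1 condition
def pvA_loop1 : List (String × String) → Option (String × String)
  | [] => none
  | f :: rest => if pvCond1 f then some f else pvA_loop1 rest

def pvCond2 (f : String × String) : Bool := PySem.Str.isIn "tryhackme" (PySem.Str.lower f.1)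
def pvCond3 (f : String × String) : Bool := PySem.Str.isIn "task" (PySem.Str.lower f.1)

-- A's second 'for' loop: first f with 'tryhackme' in f[0].lower()
def pvA_loop2 : List (String × String) → Option (String × String)
  | [] => none
  | f :: rest => if pvCond2 f then some f else pvA_loop2 rest

-- A's third 'for' loop: first f with 'task' in f[0].lower()
def pvA_loop3 : List (String × String) → Option (String × String)
  | [] => none
  | f :: rest => if pvCond3 f then some f else pvA_loop3 rest

def find_thm_feedback (feedbacks : List (String × String)) : Option String × Option String :=
  if feedbacks = [] then (none, none)
  else
    match pvA_loop1 feedbacks with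
    | some f => (some f.1, some f.2)
    | none =>
      match pvA_loop2 feedbacks with
      | some f => (some f.1, some f.2)
      | none =>
        match pvA_loop3 feedbacks with
        | some f => (some f.1, some f.2)
        | none => (none, none)

-- ===== PORT B =====
-- B's single loop carrying the priority-2 and priority-3 slots
def pvB_loop : List (String × String) → Option (String × String) → Option (String × String) → Option String × Option String
  | [], p2, p3 =>
    match p2 with
    | some x => (some x.1, some x.2)
    | none =>
      match p3 with
      | some x => (some x.1, some x.2)
      | none => (none, none)
  | f :: rest, p2, p3 =>
    if pvCond1 f then (some f.1, some f.2)
    else if p2.isNone && pvCond2 f then pvB_loop rest (some f) p3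
    else if p3.isNone && pvCond3 f then pvB_loop rest p2 (some f)
    else pvB_loop rest p2 p3

def find_thm_feedback_alt (feedbacks : List (String × String)) : Option String × Option String :=
  pvB_loop feedbacks none none

-- ===== PRECONDITION & SPEC =====
def Spec_find_thm_feedback (feedbacks : List (String × String)) (out : Option String × Option String) : Prop := out = find_thm_feedback_alt feedbacks
instance (feedbacks : List (String × String)) (out : Option String × Option String) : Decidable (Spec_find_thm_feedback feedbacks out) := by unfold Spec_find_thm_feedback; infer_instance

-- ===== CLAIM (what is proved, stated in full; the proofs are below) =====
def Claim_equal_find_thm_feedback : Prop := ∀ (feedbacks : List (String × String)), Dom_find_thm_feedback feedbacks → Spec_find_thm_feedback feedbacks (find_thm_feedback feedbacks)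

-- ===== LEMMAS AND PROOFS =====

-- invariant of B's loop: it computes A's three-scan result, with the slots standing in
-- for the part of each later scan already passed
theorem pvB_loop_eq (l : List (String × String)) (p2 p3 : Option (String × String)) :
    pvB_loop l p2 p3 =
      match pvA_loop1 l with
      | some f => (some f.1, some f.2)
      | none =>
        match p2.or (pvA_loop2 l) with
        | some g => (some g.1, some g.2)
        | none =>
          match p3.or (pvA_loop3 l) with
          | some h => (some h.1, some h.2)
          | none => (none, none) := by
  induction l generalizing p2 p3 with
  | nil => cases p2 <;> cases p3 <;> simp [pvB_loop, pvA_loop1, pvA_loop2, pvA_loop3]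
  | cons f rest ih =>
    by_cases h1 : pvCond1 f
    · simp [pvB_loop, pvA_loop1, h1]
    · by_cases h2 : pvCond2 f
      · cases p2 <;>
          simp [pvB_loop, pvA_loop1, pvA_loop2, h1, h2, ih]
      · by_cases h3 : pvCond3 f
        · cases p2 <;> cases p3 <;>
            simp [pvB_loop, pvA_loop1, pvA_loop2, pvA_loop3, h1, h2, h3, ih]
        · simp [pvB_loop, pvA_loop1, pvA_loop2, pvA_loop3, h1, h2, h3, ih]

-- ===== VERDICT (by name: the statement is the Claim_ definition above) =====
theorem find_thm_feedback_spec : Claim_equal_find_thm_feedback := by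
  intro feedbacks _
  unfold Spec_find_thm_feedback find_thm_feedback find_thm_feedback_alt
  rw [pvB_loop_eq]
  cases feedbacks with
  | nil => simp [pvA_loop1, pvA_loop2, pvA_loop3]
  | cons f rest => simp
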